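-- pv_equiv track=rewrite | github.com/bitbot-irc/bitbot | modules/channel_op.py | _mlock
-- ===== SOURCE A (Python) =====
-- def _mlock(s):
--     modes, *args = s.split(" ")
--
--     adds = ""
--     removes = ""
--     add = True
--     for c in modes:
--         if c == "+":
--             add = True
--         elif c == "-":
--             add = False
--         elif add:
--             adds += c
--         else:
--             removes += c
--
--     return (
--         "" if not adds else f"+{''.join(adds)}",
--         "" if not removes else f"-{''.join(removes)}",
--         args
--     )
-- ===== SOURCE B (Python) =====
-- def _runs(cs, adds, removes):
--     # cs always starts with a sign character here
--     if not cs: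
--         return (adds, removes)
--     sign, rest = cs[0], cs[1:]
--     k = 0
--     while k < len(rest) and rest[k] not in "+-":
--         k += 1
--     run = "".join(rest[:k])
--     if sign == "+":
--         return _runs(rest[k:], adds + run, removes)
--     else:
--         return _runs(rest[k:], adds, removes + run)
--
--
-- def _mlock(s):
--     modes, *args = s.split(" ")
--     if modes[:1] not in ("+", "-"):
--         modes = "+" + modes  # leading unsigned chars count as added
--     adds, removes = _runs(list(modes), "", "")
--     return (
--         "" if not adds else "+" + adds,
--         "" if not removes else "-" + removes,
--         args,
--     )
-- ===== Notes on version B (the rewrite author's own statement) =====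
-- stated objective: alternative
-- what changed: Replaced the per-character boolean state machine with a run-based parser: after normalising a missing leading sign by prepending a plus, it recursively reads one sign and its following run of mode characters at a time (span/takeWhile), appending whole runs to adds or removes.
import Mathlib
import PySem

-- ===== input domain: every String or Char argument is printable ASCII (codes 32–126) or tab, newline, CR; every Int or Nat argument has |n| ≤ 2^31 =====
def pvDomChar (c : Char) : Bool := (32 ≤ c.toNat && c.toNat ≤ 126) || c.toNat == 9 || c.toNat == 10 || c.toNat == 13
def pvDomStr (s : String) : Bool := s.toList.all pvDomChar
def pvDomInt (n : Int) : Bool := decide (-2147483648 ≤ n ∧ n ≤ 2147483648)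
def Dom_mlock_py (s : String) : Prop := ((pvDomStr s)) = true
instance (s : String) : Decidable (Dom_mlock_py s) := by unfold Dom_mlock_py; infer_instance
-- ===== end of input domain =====

-- B replaces A's per-character add/remove state machine by a run-based parser
-- (normalise a missing leading sign by prepending a plus, then consume one sign and its run at a time).

-- ===== PORT A =====
-- one step of A's for-loop; state = (adds, removes, add)
def mlockStepA (st : String × String × Bool) (c : Char) : String × String × Bool :=
  if c = '+' then (st.1, st.2.1, true)
  else if c = '-' then (st.1, st.2.1, false)
  else if st.2.2 then (st.1.push c, st.2.1, st.2.2)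
  else (st.1, st.2.1.push c, st.2.2)

def mlock_py (s : String) : String × String × List String :=
  let parts := (PySem.Str.split? s " ").getD []   -- s.split(" "); sep ≠ "" so never none, always nonempty
  let modes := parts.headD ""                      -- modes, *args = …
  let args := parts.tail
  let st := modes.toList.foldl mlockStepA ("", "", true)
  ((if st.1 = "" then "" else "+" ++ st.1),
   (if st.2.1 = "" then "" else "-" ++ st.2.1),
   args)

-- ===== PORT B =====
-- B's recursive helper _runs: read a sign, span off its run of non-sign chars, recurse
def mlockRuns : List Char → String → String → String × String
  | [], adds, removes => (adds, removes)
  | _c :: rest, adds, removes =>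
    let run := rest.takeWhile (fun x => x ≠ '+' && x ≠ '-')
    let rest' := rest.dropWhile (fun x => x ≠ '+' && x ≠ '-')
    if _c = '+' then mlockRuns rest' (adds ++ String.ofList run) removes
    else mlockRuns rest' adds (removes ++ String.ofList run)
termination_by cs _ _ => cs.length
decreasing_by
  all_goals
    simp only [List.length_cons]
    exact Nat.lt_succ_of_le (List.length_dropWhile_le _ _)

def mlock_py_alt (s : String) : String × String × List String :=
  let parts := (PySem.Str.split? s " ").getD []   -- s.split(" ")
  let modes0 := parts.headD ""
  let args := parts.tail
  -- if modes[:1] not in ("+","-"): modes = "+" + modes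
  let ms := if modes0.toList.take 1 = ['+'] ∨ modes0.toList.take 1 = ['-']
            then modes0.toList else '+' :: modes0.toList
  let st := mlockRuns ms "" ""
  ((if st.1 = "" then "" else "+" ++ st.1),
   (if st.2 = "" then "" else "-" ++ st.2),
   args)

-- ===== PRECONDITION & SPEC =====
def Spec_mlock_py (s : String) (out : String × String × List String) : Prop := out = mlock_py_alt s
instance (s : String) (out : String × String × List String) : Decidable (Spec_mlock_py s out) := by unfold Spec_mlock_py; infer_instance

-- ===== CLAIM (what is proved, stated in full; the proofs are below) =====
def Claim_equal_mlock_py : Prop := ∀ (s : String), Dom_mlock_py s → Spec_mlock_py s (mlock_py s)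

-- ===== LEMMAS AND PROOFS =====

-- reference routing of mode chars: (added chars, removed chars), list level
def goSpec : List Char → Bool → List Char × List Char
  | [], _ => ([], [])
  | c :: t, add =>
    if c = '+' then goSpec t true
    else if c = '-' then goSpec t false
    else if add then ((goSpec t add).1.cons c, (goSpec t add).2)
    else ((goSpec t add).1, (goSpec t add).2.cons c)

-- final value of A's boolean flag (needed to state the fold invariant)
def lastAdd : List Char → Bool → Bool
  | [], add => add
  | c :: t, add => lastAdd t (if c = '+' then true else if c = '-' then false else add)

lemma foldA (cs : List Char) (a r : List Char) (add : Bool) :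
    cs.foldl mlockStepA (String.ofList a, String.ofList r, add) =
      (String.ofList (a ++ (goSpec cs add).1), String.ofList (r ++ (goSpec cs add).2),
       lastAdd cs add) := by
  induction cs generalizing a r add with
  | nil => simp [goSpec, lastAdd]
  | cons c t ih =>
    by_cases h1 : c = '+'
    · simp [mlockStepA, goSpec, lastAdd, h1, ih]
    · by_cases h2 : c = '-'
      · simp [mlockStepA, goSpec, lastAdd, h1, h2, ih]
      · cases add with
        | true =>
          have hp : (String.ofList a).push c = String.ofList (a ++ [c]) := by
            simp [← String.toList_inj]
          have hstep : List.foldl mlockStepA (String.ofList a, String.ofList r, true) (c :: t) =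
              List.foldl mlockStepA (String.ofList (a ++ [c]), String.ofList r, true) t := by
            simp [mlockStepA, h1, h2, hp]
          rw [hstep, ih]
          simp [goSpec, lastAdd, h1, h2]
        | false =>
          have hp : (String.ofList r).push c = String.ofList (r ++ [c]) := by
            simp [← String.toList_inj]
          have hstep : List.foldl mlockStepA (String.ofList a, String.ofList r, false) (c :: t) =
              List.foldl mlockStepA (String.ofList a, String.ofList (r ++ [c]), false) t := by
            simp [mlockStepA, h1, h2, hp]
          rw [hstep, ih]
          simp [goSpec, lastAdd, h1, h2]

-- chars of a sign-free run are all routed to the current side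
lemma goSpec_run (run tail : List Char) (add : Bool)
    (h : ∀ x ∈ run, x ≠ '+' ∧ x ≠ '-') :
    goSpec (run ++ tail) add =
      (if add then (run ++ (goSpec tail add).1, (goSpec tail add).2)
       else ((goSpec tail add).1, run ++ (goSpec tail add).2)) := by
  induction run with
  | nil => cases add <;> simp
  | cons c t ih =>
    obtain ⟨h1, h2⟩ := h c (by simp)
    have ih' := ih (fun x hx => h x (by simp [hx]))
    cases add <;> simp [goSpec, h1, h2, ih']

-- the initial flag is irrelevant when the string is empty or starts with a sign
lemma goSpec_sign_head (cs : List Char) (add : Bool)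
    (h : cs = [] ∨ cs.head? = some '+' ∨ cs.head? = some '-') :
    goSpec cs add = goSpec cs true := by
  rcases h with h | h | h
  · subst h; rfl
  · cases cs with
    | nil => rfl
    | cons c t => simp at h; simp [goSpec, h]
  · cases cs with
    | nil => rfl
    | cons c t =>
      simp at h
      by_cases h1 : c = '+' <;> simp [goSpec, h, h1]

lemma runsL (cs : List Char) (a r : List Char)
    (h : cs = [] ∨ cs.head? = some '+' ∨ cs.head? = some '-') :
    mlockRuns cs (String.ofList a) (String.ofList r) =
      (String.ofList (a ++ (goSpec cs true).1), String.ofList (r ++ (goSpec cs true).2)) := by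
  induction hn : cs.length using Nat.strong_induction_on generalizing cs a r with
  | _ n ih =>
    cases cs with
    | nil => simp [mlockRuns, goSpec]
    | cons c rest =>
      have hsign : c = '+' ∨ c = '-' := by
        rcases h with h | h | h
        · simp at h
        · simp at h; exact Or.inl h
        · simp at h; exact Or.inr h
      set p : Char → Bool := fun x => x ≠ '+' && x ≠ '-' with hp
      have hsplit : rest.takeWhile p ++ rest.dropWhile p = rest :=
        List.takeWhile_append_dropWhile
      have hrunall : ∀ x ∈ rest.takeWhile p, x ≠ '+' ∧ x ≠ '-' := by
        intro x hx
        have := List.mem_takeWhile_imp hx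
        simp [hp] at this
        exact this
      have hdhead : rest.dropWhile p = [] ∨ (rest.dropWhile p).head? = some '+' ∨
          (rest.dropWhile p).head? = some '-' := by
        cases hd : rest.dropWhile p with
        | nil => exact Or.inl rfl
        | cons d ds =>
          have hne : rest.dropWhile p ≠ [] := by simp [hd]
          have hnot : p ((rest.dropWhile p).head hne) = false :=
            List.head_dropWhile_not p hne
          have hdh : (rest.dropWhile p).head hne = d := by simp [hd]
          rw [hdh] at hnot
          simp only [hp, Bool.and_eq_false_iff, decide_eq_false_iff_not, not_not,
            bne_eq_false_iff_eq, ne_eq, Bool.not_eq_true, decide_eq_false_iff_not,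
            Decidable.not_not] at hnot
          rcases hnot with hdp | hdp
          · exact Or.inr (Or.inl (by simp [hd, hdp]))
          · exact Or.inr (Or.inr (by simp [hd, hdp]))
      have hlen : (rest.dropWhile p).length < n := by
        have := List.length_dropWhile_le p rest
        simp [← hn]; omega
      have hgo : goSpec (c :: rest) true =
          (if c = '+' then (rest.takeWhile p ++ (goSpec (rest.dropWhile p) true).1,
                            (goSpec (rest.dropWhile p) true).2)
           else ((goSpec (rest.dropWhile p) true).1,
                 rest.takeWhile p ++ (goSpec (rest.dropWhile p) true).2)) := by
        rcases hsign with hc | hc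
        · have : goSpec (c :: rest) true = goSpec rest true := by simp [goSpec, hc]
          rw [this, ← hsplit, goSpec_run _ _ true hrunall]
          rw [goSpec_sign_head _ true hdhead] at *
          simp [hc, hsplit]
        · have hcne : c ≠ '+' := by simp [hc]
          have : goSpec (c :: rest) true = goSpec rest false := by simp [goSpec, hc]
          rw [this, ← hsplit, goSpec_run _ _ false hrunall]
          rw [goSpec_sign_head _ false hdhead]
          simp [hcne, hsplit]
      rcases hsign with hc | hc
      · have step : mlockRuns (c :: rest) (String.ofList a) (String.ofList r) =
            mlockRuns (rest.dropWhile p)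
              (String.ofList a ++ String.ofList (rest.takeWhile p)) (String.ofList r) := by
          rw [mlockRuns]; simp [hc, hp]
        rw [step]
        have : String.ofList a ++ String.ofList (rest.takeWhile p) =
            String.ofList (a ++ rest.takeWhile p) := by simp [← String.toList_inj]
        rw [this, ih _ hlen _ _ _ hdhead rfl, hgo]
        simp [hc]
      · have hcne : c ≠ '+' := by simp [hc]
        have step : mlockRuns (c :: rest) (String.ofList a) (String.ofList r) =
            mlockRuns (rest.dropWhile p)
              (String.ofList a) (String.ofList r ++ String.ofList (rest.takeWhile p)) := by
          rw [mlockRuns]; simp [hcne, hp]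
        rw [step]
        have : String.ofList r ++ String.ofList (rest.takeWhile p) =
            String.ofList (r ++ rest.takeWhile p) := by simp [← String.toList_inj]
        rw [this, ih _ hlen _ _ _ hdhead rfl, hgo]
        simp [hcne]

-- ===== VERDICT (by name: the statement is the Claim_ definition above) =====
theorem mlock_py_spec : Claim_equal_mlock_py := by
  intro s _
  simp only [Spec_mlock_py, mlock_py, mlock_py_alt]
  generalize ((PySem.Str.split? s " ").getD []) = parts
  generalize parts.headD "" = modes
  have hsign : ∀ (hms : List Char),
      (hms = (if modes.toList.take 1 = ['+'] ∨ modes.toList.take 1 = ['-']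
              then modes.toList else '+' :: modes.toList)) →
      hms = [] ∨ hms.head? = some '+' ∨ hms.head? = some '-' := by
    intro hms hdef
    subst hdef
    split
    · rename_i h
      cases hl : modes.toList with
      | nil => exact Or.inl rfl
      | cons c t =>
        rcases h with h | h
        · rw [hl] at h; simp at h; exact Or.inr (Or.inl (by simp [h]))
        · rw [hl] at h; simp at h; exact Or.inr (Or.inr (by simp [h]))
    · exact Or.inr (Or.inl rfl)
  set ms := (if modes.toList.take 1 = ['+'] ∨ modes.toList.take 1 = ['-']
             then modes.toList else '+' :: modes.toList) with hms
  have hgoeq : goSpec ms true = goSpec modes.toList true := by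
    rw [hms]; split
    · rfl
    · simp [goSpec]
  have hA := foldA modes.toList [] [] true
  have hB := runsL ms [] [] (hsign ms hms)
  have h0 : String.ofList ([] : List Char) = "" := rfl
  rw [h0] at hA hB
  simp only [List.nil_append] at hA hB
  rw [hA, hB, hgoeq]
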